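-- pv_equiv track=rewrite | github.com/jzucker2/schoonmaker | schoonmaker/fdx/parser.py | _split_character_and_modifiers
-- ===== SOURCE A (Python) =====
-- def _split_character_and_modifiers(
--     raw: str
-- ) -> tuple[str, list[str]]:
--     raw = raw.strip()
--     modifiers: list[str] = []
--     first_paren = raw.find("(")
--     if first_paren == -1:
--         return raw, modifiers
--     name = raw[:first_paren].strip()
--     pos = first_paren
--     while pos < len(raw):
--         open_paren = raw.find("(", pos)
--         if open_paren == -1:
--             break
--         close_paren = raw.find(")", open_paren + 1)
--         if close_paren == -1:
--             break
--         inside = raw[open_paren + 1 : close_paren].strip()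
--         if inside:
--             modifiers.append(inside)
--         pos = close_paren + 1
--     return name, modifiers
-- ===== SOURCE B (Python) =====
-- def _split_character_and_modifiers(
--     raw: str
-- ) -> tuple[str, list[str]]:
--     # One pass over the characters with a small state machine instead of
--     # repeated .find position bookkeeping.
--     raw = raw.strip()
--     first_paren = raw.find("(")
--     if first_paren == -1:
--         return raw, []
--     name = raw[:first_paren].strip()
--     modifiers: list[str] = []
--     buf = None
--     for ch in raw:
--         if buf is None:
--             if ch == "(":
--                 buf = ""
--         elif ch == ")":
--             inside = buf.strip()
--             if inside:
--                 modifiers.append(inside)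
--             buf = None
--         else:
--             buf += ch
--     return name, modifiers
-- ===== Notes on version B (the rewrite author's own statement) =====
-- stated objective: alternative
-- what changed: Replaces the position-bookkeeping while-loop of repeated str.find calls with a single character-level state-machine pass that buffers the current parenthesized chunk.
import Mathlib
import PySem

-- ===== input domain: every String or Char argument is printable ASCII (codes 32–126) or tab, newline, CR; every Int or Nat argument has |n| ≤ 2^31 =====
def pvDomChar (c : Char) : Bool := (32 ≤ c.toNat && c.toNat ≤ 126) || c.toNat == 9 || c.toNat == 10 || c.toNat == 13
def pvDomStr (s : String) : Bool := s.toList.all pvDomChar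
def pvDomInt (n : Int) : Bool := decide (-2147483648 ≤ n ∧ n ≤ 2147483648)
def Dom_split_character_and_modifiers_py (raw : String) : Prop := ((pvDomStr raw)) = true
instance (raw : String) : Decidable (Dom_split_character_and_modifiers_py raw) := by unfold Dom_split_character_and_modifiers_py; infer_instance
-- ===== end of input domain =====

-- B replaces A's while-loop of repeated str.find calls with a one-pass character state machine; return values proved equal on all inputs.

-- ===== PORT A =====
-- termination helper for A's while-loop: a successful find lands in [k, len)
lemma pvFindFrom_facts (cs sub : List Char) (hsub : sub ≠ []) (k : Nat) (hk : k ≤ cs.length)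
    (h : PySem.Chars.findFrom cs sub (k : Int) ≠ -1) :
    k ≤ (PySem.Chars.findFrom cs sub (k : Int)).toNat ∧
      (PySem.Chars.findFrom cs sub (k : Int)).toNat < cs.length ∧
      PySem.Chars.findFrom cs sub (k : Int) = ((PySem.Chars.findFrom cs sub (k : Int)).toNat : Int) := by
  obtain ⟨h1, h2, -⟩ := PySem.Chars.findFrom_natCast_spec cs sub k hk h
  have h0 : (0 : Int) ≤ PySem.Chars.findFrom cs sub (k : Int) :=
    le_trans (Int.natCast_nonneg k) h1
  have hlen : sub.length ≤ (cs.drop (PySem.Chars.findFrom cs sub (k : Int)).toNat).length :=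
    h2.length_le
  have hs : 0 < sub.length := List.length_pos_of_ne_nil hsub
  simp only [List.length_drop] at hlen
  omega

-- A's while-loop: pos/find bookkeeping, literally transcribed
def pvLoopA (cs : List Char) (pos : Nat) (acc : List (List Char)) : List (List Char) :=
  if hlt : pos < cs.length then
    if hop : PySem.Chars.findFrom cs ['('] (pos : Int) = -1 then acc
    else
      if hcl : PySem.Chars.findFrom cs [')'] (PySem.Chars.findFrom cs ['('] (pos : Int) + 1) = -1 then acc
      else
        pvLoopA cs ((PySem.Chars.findFrom cs [')'] (PySem.Chars.findFrom cs ['('] (pos : Int) + 1)).toNat + 1)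
          (if PySem.Chars.strip (PySem.List.slice cs (some (PySem.Chars.findFrom cs ['('] (pos : Int) + 1))
                (some (PySem.Chars.findFrom cs [')'] (PySem.Chars.findFrom cs ['('] (pos : Int) + 1)))) = []
           then acc
           else acc ++ [PySem.Chars.strip (PySem.List.slice cs (some (PySem.Chars.findFrom cs ['('] (pos : Int) + 1))
                (some (PySem.Chars.findFrom cs [')'] (PySem.Chars.findFrom cs ['('] (pos : Int) + 1))))])
  else acc
termination_by cs.length - pos
decreasing_by
  obtain ⟨h1, h2, h3⟩ := pvFindFrom_facts cs ['('] (by simp) pos (le_of_lt hlt) hop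
  have hc : PySem.Chars.findFrom cs ['('] (pos : Int) + 1
      = (((PySem.Chars.findFrom cs ['('] (pos : Int)).toNat + 1 : Nat) : Int) := by omega
  rw [hc] at hcl ⊢
  obtain ⟨g1, g2, g3⟩ := pvFindFrom_facts cs [')'] (by simp)
    ((PySem.Chars.findFrom cs ['('] (pos : Int)).toNat + 1) (by omega) hcl
  omega

def split_character_and_modifiers_py (raw : String) : String × List String :=
  let cs := (PySem.Str.strip raw).toList
  let fp := PySem.Chars.find cs ['(']
  if fp = -1 then (String.mk cs, [])
  else
    let name := PySem.Chars.strip (PySem.List.slice cs none (some fp))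
    (String.mk name, (pvLoopA cs fp.toNat []).map String.mk)

-- ===== PORT B =====
-- B's state machine step: buffer = none (outside parens) or some chunk (inside)
def pvStepB (st : Option (List Char) × List (List Char)) (c : Char) :
    Option (List Char) × List (List Char) :=
  match st with
  | (none, acc) => if c = '(' then (some [], acc) else (none, acc)
  | (some b, acc) =>
      if c = ')' then
        (none, if PySem.Chars.strip b = [] then acc else acc ++ [PySem.Chars.strip b])
      else (some (b ++ [c]), acc)

def split_character_and_modifiers_py_alt (raw : String) : String × List String :=
  let cs := (PySem.Str.strip raw).toList
  let fp := PySem.Chars.find cs ['(']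
  if fp = -1 then (String.mk cs, [])
  else
    let name := PySem.Chars.strip (PySem.List.slice cs none (some fp))
    (String.mk name, ((cs.foldl pvStepB (none, [])).2).map String.mk)

-- ===== PRECONDITION & SPEC =====
def Spec_split_character_and_modifiers_py (raw : String) (out : String × List String) : Prop := out = split_character_and_modifiers_py_alt raw
instance (raw : String) (out : String × List String) : Decidable (Spec_split_character_and_modifiers_py raw out) := by unfold Spec_split_character_and_modifiers_py; infer_instance

-- ===== CLAIM (what is proved, stated in full; the proofs are below) =====
def Claim_equal_split_character_and_modifiers_py : Prop := ∀ (raw : String), Dom_split_character_and_modifiers_py raw → Spec_split_character_and_modifiers_py raw (split_character_and_modifiers_py raw)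

-- ===== LEMMAS AND PROOFS =====

-- the state machine ignores everything before the first '(' it meets
lemma pvStepB_noOpen (l : List Char) (acc : List (List Char)) (h : '(' ∉ l) :
    List.foldl pvStepB (none, acc) l = (none, acc) := by
  induction l with
  | nil => rfl
  | cons c t ih =>
    have hc : c ≠ '(' := fun hc => h (hc ▸ List.mem_cons_self)
    simp only [List.foldl_cons, pvStepB, if_neg hc]
    exact ih (fun hm => h (List.mem_cons_of_mem _ hm))

-- with an open buffer, a close-free stretch is just appended to the buffer
lemma pvStepB_noClose (l : List Char) (h : ')' ∉ l) :
    ∀ (b : List Char) (acc : List (List Char)),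
      List.foldl pvStepB (some b, acc) l = (some (b ++ l), acc) := by
  induction l with
  | nil => simp
  | cons c t ih =>
    intro b acc
    have hc : c ≠ ')' := fun hc => h (hc ▸ List.mem_cons_self)
    simp only [List.foldl_cons, pvStepB, if_neg hc]
    rw [ih (fun hm => h (List.mem_cons_of_mem _ hm))]
    simp

-- the accumulator threads through the fold as a plain prefix
lemma pvStepB_acc (l : List Char) :
    ∀ (buf : Option (List Char)) (acc : List (List Char)),
      List.foldl pvStepB (buf, acc) l
        = ((List.foldl pvStepB (buf, []) l).1, acc ++ (List.foldl pvStepB (buf, []) l).2) := by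
  induction l with
  | nil => simp
  | cons c t ih =>
    intro buf acc
    have hstep : pvStepB (buf, acc) c = ((pvStepB (buf, []) c).1, acc ++ (pvStepB (buf, []) c).2) := by
      cases buf <;> simp only [pvStepB] <;> split_ifs <;> simp
    simp only [List.foldl_cons, hstep]
    rw [ih ((pvStepB (buf, []) c).1) (acc ++ (pvStepB (buf, []) c).2),
        ih ((pvStepB (buf, []) c).1) ((pvStepB (buf, []) c).2)]
    simp

-- a character of the string heads a singleton prefix of the corresponding drop
lemma pvDrop_head (cs : List Char) (i : Nat) (hi : i < cs.length) (hc : cs[i] = '(') :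
    ['('] <+: cs.drop i := by
  rw [List.drop_eq_getElem_cons hi, hc]
  exact ⟨cs.drop (i + 1), rfl⟩

lemma pvDrop_head' (cs : List Char) (i : Nat) (hi : i < cs.length) (hc : cs[i] = ')') :
    [')'] <+: cs.drop i := by
  rw [List.drop_eq_getElem_cons hi, hc]
  exact ⟨cs.drop (i + 1), rfl⟩

-- main loop invariant: A's find-loop from pos computes what B's machine computes on the suffix
lemma pvLoopA_spec (cs : List Char) :
    ∀ (pos : Nat), pos ≤ cs.length → ∀ (acc : List (List Char)),
      pvLoopA cs pos acc = acc ++ (List.foldl pvStepB (none, []) (cs.drop pos)).2 := by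
  suffices H : ∀ (n pos : Nat), cs.length - pos = n → pos ≤ cs.length → ∀ acc,
      pvLoopA cs pos acc = acc ++ (List.foldl pvStepB (none, []) (cs.drop pos)).2 by
    exact fun pos h acc => H _ pos rfl h acc
  intro n
  induction n using Nat.strong_induction_on with
  | _ n IH =>
    intro pos hn hpos acc
    rw [pvLoopA]
    by_cases hlt : pos < cs.length
    · simp only [dif_pos hlt]
      by_cases hop : PySem.Chars.findFrom cs ['('] (pos : Int) = -1
      · -- no '(' left: the machine stays outside and emits nothing
        simp only [dif_pos hop]
        have hno : ¬ ['('] <:+: cs.drop pos :=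
          (PySem.Chars.findFrom_natCast_eq_neg_one_iff cs ['('] pos hpos).mp hop
        have hmem : '(' ∉ cs.drop pos := by
          intro hm
          obtain ⟨s, t, hst⟩ := List.append_of_mem hm
          exact hno ⟨s, t, by simp [hst]⟩
        rw [pvStepB_noOpen _ _ hmem]
        simp
      · simp only [dif_neg hop]
        obtain ⟨h1, h2, h3⟩ := pvFindFrom_facts cs ['('] (by simp) pos (le_of_lt hlt) hop
        set o := (PySem.Chars.findFrom cs ['('] (pos : Int)).toNat with ho
        obtain ⟨-, hpre, hmin⟩ := PySem.Chars.findFrom_natCast_spec cs ['('] pos hpos hop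
        rw [← ho] at hpre hmin
        -- cs.drop o = '(' :: cs.drop (o+1)
        obtain ⟨t, ht⟩ := hpre
        have hdropo : cs.drop o = '(' :: t := by simpa using ht.symm
        have hdropo1 : cs.drop (o + 1) = t := by
          have h := congrArg (List.drop 1) hdropo
          rw [List.drop_drop] at h
          simpa using h
        -- splitting the suffix at the first '('
        have hsplit : cs.drop pos = (cs.drop pos).take (o - pos) ++ '(' :: cs.drop (o + 1) := by
          conv_lhs => rw [← List.take_append_drop (o - pos) (cs.drop pos)]
          rw [List.drop_drop]
          have hpo : pos + (o - pos) = o := by omega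
          rw [hpo, hdropo, hdropo1]
        have hnoOpen : '(' ∉ (cs.drop pos).take (o - pos) := by
          intro hm
          obtain ⟨i, hi, hgi⟩ := List.getElem_of_mem hm
          have hi2 : i < o - pos := lt_of_lt_of_le hi (List.length_take_le _ _)
          have hplen : pos + i < cs.length := by omega
          have hcs : cs[pos + i] = '(' := by
            rw [List.getElem_take, List.getElem_drop] at hgi
            exact hgi
          exact hmin (pos + i) (by omega) (by omega) (pvDrop_head cs (pos + i) hplen hcs)
        have hc1 : PySem.Chars.findFrom cs ['('] (pos : Int) + 1 = (((o + 1 : Nat)) : Int) := by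
          omega
        rw [hc1]
        by_cases hcl : PySem.Chars.findFrom cs [')'] (((o + 1 : Nat) : Int)) = -1
        · -- '(' with no matching ')': loop breaks, machine ends with a dangling buffer
          simp only [dif_pos hcl]
          have hno : ¬ [')'] <:+: cs.drop (o + 1) :=
            (PySem.Chars.findFrom_natCast_eq_neg_one_iff cs [')'] (o + 1) (by omega)).mp hcl
          have hmem : ')' ∉ cs.drop (o + 1) := by
            intro hm
            obtain ⟨s, t', hst⟩ := List.append_of_mem hm
            exact hno ⟨s, t', by simp [hst]⟩
          have hopen : ∀ l : List Char, List.foldl pvStepB (none, ([] : List (List Char))) ('(' :: l)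
              = List.foldl pvStepB (some [], []) l := by
            intro l; simp [pvStepB]
          have hRHS : (List.foldl pvStepB (none, []) (cs.drop pos)).2 = [] := by
            rw [hsplit, List.foldl_append, pvStepB_noOpen _ _ hnoOpen, hopen,
              pvStepB_noClose _ hmem]
          rw [hRHS]
          simp
        · simp only [dif_neg hcl]
          obtain ⟨g1, g2, g3⟩ := pvFindFrom_facts cs [')'] (by simp) (o + 1) (by omega) hcl
          set cn := (PySem.Chars.findFrom cs [')'] (((o + 1 : Nat)) : Int)).toNat with hcn
          obtain ⟨-, gpre, gmin⟩ := PySem.Chars.findFrom_natCast_spec cs [')'] (o + 1) (by omega) hcl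
          rw [← hcn] at gpre gmin
          obtain ⟨t', ht'⟩ := gpre
          have hdropc : cs.drop cn = ')' :: t' := by simpa using ht'.symm
          have hdropc1 : cs.drop (cn + 1) = t' := by
            have h := congrArg (List.drop 1) hdropc
            rw [List.drop_drop] at h
            simpa using h
          have hsplit2 : cs.drop (o + 1)
              = (cs.drop (o + 1)).take (cn - (o + 1)) ++ ')' :: cs.drop (cn + 1) := by
            conv_lhs => rw [← List.take_append_drop (cn - (o + 1)) (cs.drop (o + 1))]
            rw [List.drop_drop]
            have hco : o + 1 + (cn - (o + 1)) = cn := by omega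
            rw [hco, hdropc, hdropc1]
          have hnoClose : ')' ∉ (cs.drop (o + 1)).take (cn - (o + 1)) := by
            intro hm
            obtain ⟨i, hi, hgi⟩ := List.getElem_of_mem hm
            have hi2 : i < cn - (o + 1) := lt_of_lt_of_le hi (List.length_take_le _ _)
            have hplen : o + 1 + i < cs.length := by omega
            have hcs : cs[o + 1 + i] = ')' := by
              rw [List.getElem_take, List.getElem_drop] at hgi
              exact hgi
            exact gmin (o + 1 + i) (by omega) (by omega) (pvDrop_head' cs (o + 1 + i) hplen hcs)
          -- the slice A takes is exactly the buffered mid-segment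
          have hslice : PySem.List.slice cs (some (((o + 1 : Nat)) : Int)) (some (PySem.Chars.findFrom cs [')'] (((o + 1 : Nat)) : Int)))
              = (cs.drop (o + 1)).take (cn - (o + 1)) := by
            rw [g3]
            exact PySem.List.slice_natCast cs (o + 1) cn
          rw [hslice]
          have hIH := IH (cs.length - (cn + 1)) (by omega) (cn + 1) rfl (by omega)
          rw [hIH]
          have hopen : ∀ l : List Char, List.foldl pvStepB (none, ([] : List (List Char))) ('(' :: l)
              = List.foldl pvStepB (some [], []) l := by
            intro l; simp [pvStepB]
          have hclose : ∀ l : List Char,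
              List.foldl pvStepB (some ((cs.drop (o + 1)).take (cn - (o + 1))), ([] : List (List Char))) (')' :: l)
              = List.foldl pvStepB (none, if PySem.Chars.strip ((cs.drop (o + 1)).take (cn - (o + 1))) = [] then []
                  else [PySem.Chars.strip ((cs.drop (o + 1)).take (cn - (o + 1)))]) l := by
            intro l
            simp only [List.foldl_cons, pvStepB, if_pos rfl]
            split_ifs <;> rfl
          -- run the machine over the decomposed suffix
          have hRHS : (List.foldl pvStepB (none, []) (cs.drop pos)).2
              = (if PySem.Chars.strip ((cs.drop (o + 1)).take (cn - (o + 1))) = [] then []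
                  else [PySem.Chars.strip ((cs.drop (o + 1)).take (cn - (o + 1)))])
                ++ (List.foldl pvStepB (none, []) (cs.drop (cn + 1))).2 := by
            rw [hsplit, List.foldl_append, pvStepB_noOpen _ _ hnoOpen, hopen]
            conv_lhs => rw [hsplit2]
            rw [List.foldl_append, pvStepB_noClose _ hnoClose, List.nil_append, hclose,
              pvStepB_acc (cs.drop (cn + 1))]
          rw [hRHS]
          by_cases hmid : PySem.Chars.strip ((cs.drop (o + 1)).take (cn - (o + 1))) = [] <;>
            simp [hmid]
    · -- pos = cs.length: empty suffix on both sides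
      simp only [dif_neg hlt]
      have : cs.drop pos = [] := List.drop_eq_nil_of_le (by omega)
      rw [this]
      simp

-- ===== VERDICT (by name: the statement is the Claim_ definition above) =====
theorem split_character_and_modifiers_py_spec : Claim_equal_split_character_and_modifiers_py := by
  intro raw _
  unfold Spec_split_character_and_modifiers_py
  unfold split_character_and_modifiers_py split_character_and_modifiers_py_alt
  set cs := (PySem.Str.strip raw).toList with hcs
  by_cases hfp : PySem.Chars.find cs ['('] = -1
  · simp [hfp]
  · simp only [if_neg hfp]
    -- find = findFrom at 0
    have hff : PySem.Chars.findFrom cs ['('] ((0 : Nat) : Int) = PySem.Chars.find cs ['('] := by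
      simpa using PySem.Chars.findFrom_zero cs ['(']
    have hop : PySem.Chars.findFrom cs ['('] ((0 : Nat) : Int) ≠ -1 := by rw [hff]; exact hfp
    obtain ⟨h1, h2, h3⟩ := pvFindFrom_facts cs ['('] (by simp) 0 (Nat.zero_le _) hop
    obtain ⟨-, -, hmin⟩ := PySem.Chars.findFrom_natCast_spec cs ['('] 0 (Nat.zero_le _) hop
    set o := (PySem.Chars.findFrom cs ['('] ((0 : Nat) : Int)).toNat with ho
    have hoto : (PySem.Chars.find cs ['(']).toNat = o := by rw [ho, hff]
    -- the prefix before the first '(' contains no '(': the machine skips it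
    have hnoOpen : '(' ∉ cs.take o := by
      intro hm
      obtain ⟨i, hi, hgi⟩ := List.getElem_of_mem hm
      have hi2 : i < o := lt_of_lt_of_le hi (List.length_take_le _ _)
      have hplen : i < cs.length := by omega
      have hcs' : cs[i] = '(' := by rw [List.getElem_take] at hgi; exact hgi
      exact hmin i (Nat.zero_le _) hi2 (pvDrop_head cs i hplen hcs')
    have hfold : List.foldl pvStepB (none, []) cs = List.foldl pvStepB (none, []) (cs.drop o) := by
      conv_lhs => rw [← List.take_append_drop o cs]
      rw [List.foldl_append, pvStepB_noOpen _ _ hnoOpen]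
    rw [hoto, pvLoopA_spec cs o (le_of_lt h2) [], hfold]
    simp
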